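-- pv_equiv track=rewrite | github.com/NucleicAcidTest/ymca | problems/p007_smallest_registration_permutation/solution.py | smallestPermutation
-- ===== SOURCE A (Python) =====
-- def smallestPermutation(num):
--     if num == 0:
--         return 0
--
--     if num > 0:
--         digits = list(str(num))
--         digits.sort()
--
--         first_non_zero = 0
--         while first_non_zero < len(digits) and digits[first_non_zero] == "0":
--             first_non_zero += 1
--
--         result = [digits[first_non_zero]]
--         result.extend(digits[:first_non_zero])
--         result.extend(digits[first_non_zero + 1:])
--         return int("".join(result))
--
--     digits = list(str(-num))
--     digits.sort(reverse=True)
--     return -int("".join(digits))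
-- ===== SOURCE B (Python) =====
-- def smallestPermutation(num):
--     if num == 0:
--         return 0
--
--     s = str(abs(num))
--     counts = [(d, sum(ch == d for ch in s)) for d in "0123456789"]
--
--     if num < 0:
--         digits = "".join(d * c for d, c in reversed(counts))
--         return -int(digits)
--
--     zeros = counts[0]
--     nonzero = counts[1:]
--     lead = next(d for d, c in nonzero if c > 0)
--     rest = "".join(d * (c - 1 if d == lead else c) for d, c in nonzero)
--     return int(lead + "0" * zeros[1] + rest)
-- ===== Notes on version B (the rewrite author's own statement) =====
-- stated objective: alternative
-- what changed: Replaces the comparison sort of the digit characters by a counting pass (per-digit frequency table) from which the smallest (or, for negatives, largest) permutation is assembled bucket by bucket, with the first non-zero digit pulled out directly instead of being located by a scan of the sorted list.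
import Mathlib
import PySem

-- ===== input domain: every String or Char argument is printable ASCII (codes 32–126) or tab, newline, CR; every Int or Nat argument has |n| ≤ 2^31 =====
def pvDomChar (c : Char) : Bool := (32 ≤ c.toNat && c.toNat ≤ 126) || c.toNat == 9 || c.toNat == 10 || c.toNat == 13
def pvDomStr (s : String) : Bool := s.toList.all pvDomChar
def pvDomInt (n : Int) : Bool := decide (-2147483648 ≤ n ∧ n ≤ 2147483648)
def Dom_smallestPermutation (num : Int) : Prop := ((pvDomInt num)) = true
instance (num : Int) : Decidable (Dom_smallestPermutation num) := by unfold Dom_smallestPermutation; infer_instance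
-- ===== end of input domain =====

-- B replaces A's comparison sort of the digit characters by a per-digit counting pass and
-- assembles the result bucket by bucket (objective: alternative algorithm, same exact values).

-- ===== PORT A =====

-- A's while loop: 'while first_non_zero < len(digits) and digits[first_non_zero] == "0"'
def pvFnzLoop (digits : List Char) (i : Nat) : Nat :=
  if h : i < digits.length ∧ digits.getD i ' ' = '0' then pvFnzLoop digits (i + 1) else i
termination_by digits.length - i
decreasing_by omega

def smallestPermutation (num : Int) : Int :=
  if num = 0 then 0
  else if 0 < num then
    let digits := PySem.List.sorted (PySem.Int.toStr num).toList (fun c => c) false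
    let fnz := pvFnzLoop digits 0
    (PySem.Int.ofChars? ([PySem.List.pyGetD digits (fnz : Int) ' ']
      ++ PySem.List.slice digits none (some (fnz : Int))
      ++ PySem.List.slice digits (some ((fnz : Int) + 1)) none)).getD 0
      -- int("".join(result)); the joined digits are never malformed, so none is unreachable
  else
    Neg.neg ((PySem.Int.ofChars? (PySem.List.sorted (PySem.Int.toStr (-num)).toList
      (fun c => c) true)).getD 0)
      -- return -int("".join(digits))

-- ===== PORT B =====

def smallestPermutation_alt (num : Int) : Int :=
  if num = 0 then 0
  else
    let s := (PySem.Int.toStr |num|).toList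
    -- counts = [(d, sum(ch == d for ch in s)) for d in "0123456789"]  (string iteration = its chars)
    let counts := ['0', '1', '2', '3', '4', '5', '6', '7', '8', '9'].map
      (fun d => (d, s.foldl (fun a ch => a + (if ch == d then (1 : Int) else 0)) 0))
    if num < 0 then
      Neg.neg ((PySem.Int.ofChars? (counts.reverse.flatMap
        (fun p => PySem.List.pyRepeat [p.1] p.2))).getD 0)
        -- return -int("".join(d * c for d, c in reversed(counts)))
    else
      let zeros := PySem.List.pyGetD counts 0 ('0', 0)
      let nonzero := PySem.List.slice counts (some 1) none
      let lead := ((nonzero.find? (fun p => decide (0 < p.2))).getD ('0', 0)).1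
      let rest := nonzero.flatMap
        (fun p => PySem.List.pyRepeat [p.1] (if p.1 == lead then p.2 - 1 else p.2))
      (PySem.Int.ofChars? (lead :: (PySem.List.pyRepeat ['0'] zeros.2 ++ rest))).getD 0
        -- int(lead + "0" * zeros[1] + rest); never malformed here

-- ===== PRECONDITION & SPEC =====
def Spec_smallestPermutation (num : Int) (out : Int) : Prop := out = smallestPermutation_alt num
instance (num : Int) (out : Int) : Decidable (Spec_smallestPermutation num out) := by unfold Spec_smallestPermutation; infer_instance

-- ===== CLAIM (what is proved, stated in full; the proofs are below) =====
def Claim_equal_smallestPermutation : Prop := ∀ (num : Int), Dom_smallestPermutation num → Spec_smallestPermutation num (smallestPermutation num)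

-- ===== LEMMAS AND PROOFS =====

def pvLit : List Char := ['0', '1', '2', '3', '4', '5', '6', '7', '8', '9']
def pvNz : List Char := ['1', '2', '3', '4', '5', '6', '7', '8', '9']

-- characterisation of Nat.toDigits 10
def pvDigs (n : Nat) : List Char :=
  if h : n < 10 then [Nat.digitChar n]
  else pvDigs (n / 10) ++ [Nat.digitChar (n % 10)]
termination_by n
decreasing_by omega

theorem pv_core_eq : ∀ (fuel n : Nat) (ds : List Char), n < fuel →
    Nat.toDigitsCore 10 fuel n ds = pvDigs n ++ ds := by
  intro fuel
  induction fuel with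
  | zero => intro n ds h; omega
  | succ fuel ih =>
    intro n ds h
    rw [Nat.toDigitsCore]
    by_cases h10 : n / 10 = 0
    · have hlt : n < 10 := by omega
      rw [if_pos h10, pvDigs, dif_pos hlt, Nat.mod_eq_of_lt hlt]
      rfl
    · have hge : ¬ n < 10 := by omega
      rw [if_neg h10, ih (n / 10) _ (by omega)]
      conv_rhs => rw [pvDigs]
      rw [dif_neg hge, List.append_assoc]
      rfl

theorem pv_toDigits_eq (n : Nat) : Nat.toDigits 10 n = pvDigs n := by
  show Nat.toDigitsCore 10 (n + 1) n [] = pvDigs n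
  rw [pv_core_eq (n + 1) n [] (by omega), List.append_nil]

theorem pvDigs_mem (n : Nat) : ∀ c ∈ pvDigs n, ∃ d, d < 10 ∧ c = Nat.digitChar d := by
  induction n using Nat.strong_induction_on with
  | _ n ih =>
    intro c hc
    rw [pvDigs] at hc
    by_cases h : n < 10
    · rw [dif_pos h] at hc
      simp at hc
      exact ⟨n, h, hc⟩
    · rw [dif_neg h] at hc
      rcases List.mem_append.mp hc with h1 | h1
      · exact ih (n / 10) (by omega) c h1
      · simp at h1
        exact ⟨n % 10, by omega, h1⟩

theorem pvDigs_ne_zero : ∀ n : Nat, 1 ≤ n → ∃ c ∈ pvDigs n, c ≠ '0' := by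
  intro n
  induction n using Nat.strong_induction_on with
  | _ n ih =>
    intro hn
    rw [pvDigs]
    by_cases h : n < 10
    · rw [dif_pos h]
      refine ⟨Nat.digitChar n, by simp, ?_⟩
      interval_cases n <;> decide
    · rw [dif_neg h]
      obtain ⟨c, hc1, hc2⟩ := ih (n / 10) (by omega) (by omega)
      exact ⟨c, List.mem_append.mpr (Or.inl hc1), hc2⟩

theorem pv_cs_mem (m : Nat) : ∀ c ∈ pvDigs m, c ∈ pvLit := by
  intro c hc
  obtain ⟨d, hd, rfl⟩ := pvDigs_mem m c hc
  have h : ∀ d, d < 10 → Nat.digitChar d ∈ pvLit := by decide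
  exact h d hd

-- counting foldl is List.count
theorem pv_foldl_count (l : List Char) (d : Char) : ∀ (a : Int),
    l.foldl (fun a ch => a + (if ch == d then (1 : Int) else 0)) a = a + (l.count d : Int) := by
  induction l with
  | nil => intro a; simp
  | cons x xs ih =>
    intro a
    simp only [List.foldl_cons, List.count_cons, ih]
    by_cases h : x = d
    · simp [h]; ring
    · simp [h]

-- flatMap congruence and composition with map
theorem pv_flatMap_congr {α β : Type} (l : List α) (f g : α → List β)
    (h : ∀ x ∈ l, f x = g x) : l.flatMap f = l.flatMap g := by
  induction l with
  | nil => rfl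
  | cons x xs ih =>
    simp only [List.flatMap_cons]
    rw [h x (by simp), ih (fun y hy => h y (by simp [hy]))]

theorem pv_flatMap_map {α β γ : Type} (l : List α) (f : α → β) (g : β → List γ) :
    (l.map f).flatMap g = l.flatMap (fun x => g (f x)) := by
  induction l with
  | nil => rfl
  | cons x xs ih => simp only [List.map_cons, List.flatMap_cons, ih]

-- bucket concatenation: counts and permutation
theorem pv_count_bucket (cs : List Char) (lit : List Char) (hnd : lit.Nodup) (a : Char) :
    (lit.flatMap (fun d => List.replicate (cs.count d) d)).count a
      = if a ∈ lit then cs.count a else 0 := by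
  induction lit with
  | nil => simp
  | cons d rest ih =>
    have hnd' : rest.Nodup := (List.nodup_cons.mp hnd).2
    have hdn : d ∉ rest := (List.nodup_cons.mp hnd).1
    simp only [List.flatMap_cons, List.count_append, ih hnd', List.count_replicate]
    by_cases h : a = d
    · subst h
      simp [hdn]
    · simp [h, Ne.symm h, List.mem_cons]

theorem pv_perm_bucket (cs : List Char) (lit : List Char) (hnd : lit.Nodup)
    (hsub : ∀ c ∈ cs, c ∈ lit) :
    (lit.flatMap (fun d => List.replicate (cs.count d) d)).Perm cs := by
  rw [List.perm_iff_count]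
  intro a
  rw [pv_count_bucket cs lit hnd a]
  by_cases h : a ∈ lit
  · simp [h]
  · have ha : a ∉ cs := fun hc => h (hsub a hc)
    simp [h, List.count_eq_zero.mpr ha]

-- bucket concatenation: ordering
theorem pv_pairwise_bucket (f : Char → Nat) (R : Char → Char → Prop)
    (hrefl : ∀ c, R c c) :
    ∀ (lit : List Char), lit.Pairwise R →
      (lit.flatMap (fun d => List.replicate (f d) d)).Pairwise R := by
  intro lit
  induction lit with
  | nil => simp
  | cons d rest ih =>
    intro hp
    rw [List.pairwise_cons] at hp
    simp only [List.flatMap_cons]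
    rw [List.pairwise_append]
    refine ⟨List.pairwise_replicate.mpr (Or.inr (hrefl d)), ih hp.2, ?_⟩
    intro a ha b hb
    rw [List.eq_of_mem_replicate ha]
    obtain ⟨e, he, hbe⟩ := List.mem_flatMap.mp hb
    rw [List.eq_of_mem_replicate hbe]
    exact hp.1 e he

theorem pv_sorted_asc (cs : List Char) (hmem : ∀ c ∈ cs, c ∈ pvLit) :
    PySem.List.sorted cs (fun c => c) false
      = pvLit.flatMap (fun d => List.replicate (cs.count d) d) := by
  exact PySem.List.sorted_id_eq_of_perm_of_pairwise cs _
    (pv_perm_bucket cs pvLit (by decide) hmem)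
    (pv_pairwise_bucket _ _ (fun c => le_refl c) _ (by decide))

theorem pv_sorted_desc (cs : List Char) (hmem : ∀ c ∈ cs, c ∈ pvLit) :
    PySem.List.sorted cs (fun c => c) true
      = pvLit.reverse.flatMap (fun d => List.replicate (cs.count d) d) := by
  exact List.eq_of_perm_of_sorted
    (fun a b _ _ h1 h2 => le_antisymm h2 h1)
    (PySem.List.sorted_pairwise_rev cs (fun c => c))
    (pv_pairwise_bucket (fun d => cs.count d) (fun a b => b ≤ a)
      (fun c => le_refl c) pvLit.reverse (by decide))
    ((PySem.List.sorted_perm cs _ true).trans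
      (pv_perm_bucket cs pvLit.reverse (by decide) (fun c hc => by simpa using hmem c hc)).symm)

-- the first-nonzero scan over (replicate k '0' ++ nz)
theorem pv_fnz_spec (k : Nat) (nz : List Char) (hnz : ∀ c ∈ nz, c ≠ '0') :
    ∀ i, i ≤ k → pvFnzLoop (List.replicate k '0' ++ nz) i = k := by
  intro i hi
  induction hm : k - i generalizing i with
  | zero =>
    have hik : i = k := by omega
    subst hik
    rw [pvFnzLoop, dif_neg]
    rintro ⟨hlt, heq⟩
    cases nz with
    | nil => simp at hlt
    | cons a t =>
      have hgd : (List.replicate i '0' ++ a :: t).getD i ' ' = a := by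
        rw [List.getD_eq_getElem?_getD, List.getElem?_append_right (by simp)]
        simp
      rw [hgd] at heq
      exact hnz a (by simp) heq
  | succ m ihm =>
    have hik : i < k := by omega
    rw [pvFnzLoop, dif_pos]
    · exact ihm (i + 1) (by omega) (by omega)
    · constructor
      · simp
        omega
      · rw [List.getD_eq_getElem?_getD, List.getElem?_append_left (by simp [hik])]
        simp [hik]

-- decomposition of the nonzero part, as B computes it
theorem pv_nz_decomp (cnt : Char → Nat) :
    ∀ (nzlit : List Char), nzlit.Nodup → (∃ d ∈ nzlit, 0 < cnt d) →
    ∃ ld, ((nzlit.map (fun d => (d, (cnt d : Int)))).find? (fun p => decide (0 < p.2)))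
            = some (ld, (cnt ld : Int)) ∧
      nzlit.flatMap (fun d => List.replicate (cnt d) d)
        = ld :: nzlit.flatMap (fun d => List.replicate (if d = ld then cnt d - 1 else cnt d) d) := by
  intro nzlit
  induction nzlit with
  | nil =>
    rintro _ ⟨d, hd, _⟩
    cases hd
  | cons d rest ih =>
    intro hnd hex
    by_cases hd : 0 < cnt d
    · refine ⟨d, ?_, ?_⟩
      · rw [List.map_cons, List.find?_cons_of_pos (by simpa using hd)]
      · have hrest : rest.flatMap (fun e => List.replicate (if e = d then cnt e - 1 else cnt e) e)
            = rest.flatMap (fun e => List.replicate (cnt e) e) := by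
          apply pv_flatMap_congr
          intro e he
          have hne : e ≠ d := fun h => ((List.nodup_cons.mp hnd).1 (h ▸ he))
          rw [if_neg hne]
        obtain ⟨c, hc⟩ : ∃ c, cnt d = c + 1 := ⟨cnt d - 1, by omega⟩
        rw [List.flatMap_cons, List.flatMap_cons, if_pos rfl, hrest, hc]
        simp [List.replicate_succ]
    · have hc0 : cnt d = 0 := by omega
      obtain ⟨d', hd', hcd'⟩ := hex
      have hd'r : d' ∈ rest := by
        rcases List.mem_cons.mp hd' with h | h
        · exfalso; rw [h] at hcd'; omega
        · exact h
      obtain ⟨ld, hfind, hflat⟩ := ih (List.nodup_cons.mp hnd).2 ⟨d', hd'r, hcd'⟩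
      refine ⟨ld, ?_, ?_⟩
      · rw [List.map_cons, List.find?_cons_of_neg (by simp [hc0]), hfind]
      · have hz : (if d = ld then cnt d - 1 else cnt d) = 0 := by
          rw [hc0]; split <;> rfl
        rw [List.flatMap_cons, List.flatMap_cons, hz, hc0, hflat]
        simp

-- ===== VERDICT (by name: the statement is the Claim_ definition above) =====
set_option maxRecDepth 8192 in
theorem smallestPermutation_spec : Claim_equal_smallestPermutation := by
  intro num _hdom
  unfold Spec_smallestPermutation
  by_cases h0 : num = 0
  · simp [smallestPermutation, smallestPermutation_alt, h0]
  · by_cases hpos : 0 < num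
    · -- positive case
      have hneglt : ¬ num < 0 := by omega
      have habs : |num| = num := abs_of_pos hpos
      have hcs : (PySem.Int.toStr num).toList = pvDigs num.toNat := by
        rw [PySem.Int.toList_toStr]
        simp only [PySem.Int.toChars, if_neg hneglt]
        exact pv_toDigits_eq num.toNat
      set m := num.toNat with hmdef
      set cs := pvDigs m with hcsdef
      have hm : 1 ≤ m := by omega
      have hsorted : PySem.List.sorted cs (fun c => c) false
          = List.replicate (cs.count '0') '0'
            ++ pvNz.flatMap (fun d => List.replicate (cs.count d) d) := by
        rw [pv_sorted_asc cs (pv_cs_mem m), show pvLit = '0' :: pvNz from rfl,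
          List.flatMap_cons]
      obtain ⟨c0, hc0mem, hc0ne⟩ := pvDigs_ne_zero m hm
      have hcnz : c0 ∈ pvNz := by
        have h := pv_cs_mem m c0 hc0mem
        rcases List.mem_cons.mp h with h | h
        · exact absurd h hc0ne
        · exact h
      obtain ⟨ld, hfind, hflat⟩ := pv_nz_decomp (fun d => cs.count d) pvNz (by decide)
        ⟨c0, hcnz, List.count_pos_iff.mpr hc0mem⟩
      have hnzprop : ∀ c ∈ pvNz.flatMap (fun d => List.replicate (cs.count d) d), c ≠ '0' := by
        intro c hc
        obtain ⟨e, he, hce⟩ := List.mem_flatMap.mp hc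
        rw [List.eq_of_mem_replicate hce]
        have h9 : ∀ e ∈ pvNz, e ≠ '0' := by
          intro e he
          fin_cases he <;> decide
        exact h9 e he
      have hfnz : pvFnzLoop (List.replicate (cs.count '0') '0'
          ++ pvNz.flatMap (fun d => List.replicate (cs.count d) d)) 0 = cs.count '0' :=
        pv_fnz_spec (cs.count '0') _ hnzprop 0 (by omega)
      have hgd : PySem.List.pyGetD (List.replicate (cs.count '0') '0'
            ++ pvNz.flatMap (fun d => List.replicate (cs.count d) d))
            ((cs.count '0' : Nat) : Int) ' ' = ld := by
        rw [PySem.List.pyGetD_natCast, hflat, List.getD_eq_getElem?_getD,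
          List.getElem?_append_right (by simp)]
        simp
      have htake : PySem.List.slice (List.replicate (cs.count '0') '0'
            ++ pvNz.flatMap (fun d => List.replicate (cs.count d) d))
            none (some ((cs.count '0' : Nat) : Int)) = List.replicate (cs.count '0') '0' := by
        rw [PySem.List.slice_to_natCast]
        exact List.take_left' (by simp)
      have hdrop : PySem.List.slice (List.replicate (cs.count '0') '0'
            ++ pvNz.flatMap (fun d => List.replicate (cs.count d) d))
            (some (((cs.count '0' : Nat) : Int) + 1)) none
          = pvNz.flatMap (fun d => List.replicate (if d = ld then cs.count d - 1 else cs.count d) d) := by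
        rw [show ((cs.count '0' : Nat) : Int) + 1 = (((cs.count '0' + 1 : Nat)) : Int) by push_cast; ring]
        rw [PySem.List.slice_from_natCast, hflat]
        rw [show cs.count '0' + 1 = (List.replicate (cs.count '0') '0').length + 1 by simp]
        rw [List.drop_append]
        simp
      have hrest : (pvNz.map (fun d => (d, (cs.count d : Int)))).flatMap
            (fun p => PySem.List.pyRepeat [p.1] (if p.1 == ld then p.2 - 1 else p.2))
          = pvNz.flatMap (fun d => List.replicate (if d = ld then cs.count d - 1 else cs.count d) d) := by
        rw [pv_flatMap_map]
        apply pv_flatMap_congr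
        intro e _he
        by_cases h : e = ld
        · rw [if_pos (by simp [h]), if_pos h, PySem.List.pyRepeat_singleton]
          congr 1
          omega
        · rw [if_neg (by simp [h]), if_neg h, PySem.List.pyRepeat_singleton,
            Int.toNat_natCast]
      simp only [smallestPermutation, smallestPermutation_alt, if_neg h0, if_pos hpos,
        if_neg hneglt, habs, hcs]
      rw [hsorted, hfnz, hgd, htake, hdrop]
      simp only [pv_foldl_count, zero_add]
      rw [show ['0', '1', '2', '3', '4', '5', '6', '7', '8', '9'] = '0' :: pvNz from rfl]
      simp only [List.map_cons, PySem.List.slice_from_one, List.tail_cons,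
        PySem.List.pyGetD_zero_cons]
      simp only [hfind, Option.getD_some]
      rw [hrest]
      simp
    · -- negative case
      have hneg : num < 0 := by omega
      have habs : |num| = -num := abs_of_neg hneg
      have hcs : (PySem.Int.toStr (-num)).toList = pvDigs (-num).toNat := by
        rw [PySem.Int.toList_toStr]
        simp only [PySem.Int.toChars, if_neg (by omega : ¬ (-num) < 0)]
        exact pv_toDigits_eq (-num).toNat
      set m := (-num).toNat with hmdef
      set cs := pvDigs m with hcsdef
      have hsorted := pv_sorted_desc cs (pv_cs_mem m)
      have hrev : (pvLit.map (fun d => (d, (cs.count d : Int)))).reverse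
          = pvLit.reverse.map (fun d => (d, (cs.count d : Int))) := by
        simp
      have hflat : (pvLit.map (fun d => (d, (cs.count d : Int)))).reverse.flatMap
            (fun p => PySem.List.pyRepeat [p.1] p.2)
          = pvLit.reverse.flatMap (fun d => List.replicate (cs.count d) d) := by
        rw [hrev, pv_flatMap_map]
        apply pv_flatMap_congr
        intro e _he
        rw [PySem.List.pyRepeat_singleton, Int.toNat_natCast]
      simp only [smallestPermutation, smallestPermutation_alt, if_neg h0,
        if_neg hpos, if_pos hneg, habs, hcs]
      rw [hsorted]
      simp only [pv_foldl_count, zero_add]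
      rw [show ['0', '1', '2', '3', '4', '5', '6', '7', '8', '9'] = pvLit from rfl, hflat]
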